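-- pv_equiv track=rewrite | github.com/Vastav1812/SynapseBot | agents/developer_agent.py | _prioritize_optimizations
-- ===== SOURCE A (Python) =====
-- from typing import Dict, List, Optional, Tuple, Any
--
-- def _prioritize_optimizations(response: str) -> List[Dict[str, str]]:
--     """Prioritize optimization recommendations"""
--     priorities = []
--
--     sections = response.split('\n\n')
--     for section in sections:
--         if 'quick win' in section.lower():
--             priorities.append({
--                 "priority": "immediate",
--                 "type": "quick_win",
--                 "description": section.strip()
--             })
--         elif 'medium-term' in section.lower():
--             priorities.append({
--                 "priority": "medium",
--                 "type": "refactoring",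
--                 "description": section.strip()
--             })
--         elif 'long-term' in section.lower():
--             priorities.append({
--                 "priority": "low",
--                 "type": "architecture",
--                 "description": section.strip()
--             })
--
--     return sorted(priorities, key=lambda x: {'immediate': 0, 'medium': 1, 'low': 2}[x['priority']])
-- ===== SOURCE B (Python) =====
-- def _prioritize_optimizations(response):
--     """Prioritize optimization recommendations (bucket partition, no sort)."""
--     immediate, medium, low = [], [], []
--     for section in response.split('\n\n'):
--         lowered = section.lower()
--         if 'quick win' in lowered:
--             immediate.append({
--                 "priority": "immediate",
--                 "type": "quick_win",
--                 "description": section.strip()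
--             })
--         elif 'medium-term' in lowered:
--             medium.append({
--                 "priority": "medium",
--                 "type": "refactoring",
--                 "description": section.strip()
--             })
--         elif 'long-term' in lowered:
--             low.append({
--                 "priority": "low",
--                 "type": "architecture",
--                 "description": section.strip()
--             })
--     return immediate + medium + low
-- ===== Notes on version B (the rewrite author's own statement) =====
-- stated objective: simpler
-- what changed: Single pass routing each section into one of three priority buckets and concatenating them, instead of building one list and then running sorted() with a dict-lookup key.
import Mathlib
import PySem

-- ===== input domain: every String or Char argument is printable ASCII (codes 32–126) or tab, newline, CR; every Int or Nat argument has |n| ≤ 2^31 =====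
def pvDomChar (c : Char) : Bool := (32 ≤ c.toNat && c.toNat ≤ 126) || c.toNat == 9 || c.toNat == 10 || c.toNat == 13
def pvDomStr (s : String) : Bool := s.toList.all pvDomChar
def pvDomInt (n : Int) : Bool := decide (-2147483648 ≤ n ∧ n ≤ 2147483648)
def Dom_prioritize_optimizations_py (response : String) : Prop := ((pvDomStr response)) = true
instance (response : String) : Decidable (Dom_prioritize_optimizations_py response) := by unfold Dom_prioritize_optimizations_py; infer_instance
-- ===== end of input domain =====

-- B replaces A's build-then-sorted() (3-level dict-lookup key) by one pass routing each
-- section into three priority buckets concatenated in order: simpler, no sort.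

-- ===== PORT A =====
-- x['priority'] : first match in the association list; the "" default is unreachable
-- (every item A builds carries a "priority" key), kept only to make the function total.
def pvItemGet (x : List (String × String)) (k : String) : String :=
  match x.find? (fun p => p.1 == k) with
  | some p => p.2
  | none => ""

-- the dict literal {'immediate': 0, 'medium': 1, 'low': 2}
def pvPriorityKeyDict : PySem.Dict String Int :=
  (((PySem.Dict.empty : PySem.Dict String Int).insert "immediate" 0).insert "medium" 1).insert "low" 2

-- the sort key lambda; the .getD 0 default is unreachable (KeyError cannot occur: every
-- item's priority is one of the three dict keys).
def pvPriorityKey (x : List (String × String)) : Int :=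
  (pvPriorityKeyDict.get? (pvItemGet x "priority")).getD 0

-- loop body of A's for-loop (appends the matching dict, in branch order)
def pvStepA (acc : List (List (String × String))) (sec : String) : List (List (String × String)) :=
  if PySem.Str.isIn "quick win" (PySem.Str.lower sec) then
    acc ++ [[("priority", "immediate"), ("type", "quick_win"), ("description", PySem.Str.strip sec)]]
  else if PySem.Str.isIn "medium-term" (PySem.Str.lower sec) then
    acc ++ [[("priority", "medium"), ("type", "refactoring"), ("description", PySem.Str.strip sec)]]
  else if PySem.Str.isIn "long-term" (PySem.Str.lower sec) then
    acc ++ [[("priority", "low"), ("type", "architecture"), ("description", PySem.Str.strip sec)]]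
  else acc

def prioritize_optimizations_py (response : String) : List (List (String × String)) :=
  let sections := (PySem.Str.split? response "\n\n").getD []  -- separator ≠ "", never none
  let priorities := sections.foldl pvStepA []
  PySem.List.sorted priorities pvPriorityKey

-- ===== PORT B =====
-- loop body of B's for-loop: route the section into one of the three buckets
def pvStepB (acc : List (List (String × String)) × List (List (String × String)) × List (List (String × String)))
    (sec : String) :
    List (List (String × String)) × List (List (String × String)) × List (List (String × String)) :=
  let lowered := PySem.Str.lower sec
  if PySem.Str.isIn "quick win" lowered then
    (acc.1 ++ [[("priority", "immediate"), ("type", "quick_win"), ("description", PySem.Str.strip sec)]], acc.2.1, acc.2.2)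
  else if PySem.Str.isIn "medium-term" lowered then
    (acc.1, acc.2.1 ++ [[("priority", "medium"), ("type", "refactoring"), ("description", PySem.Str.strip sec)]], acc.2.2)
  else if PySem.Str.isIn "long-term" lowered then
    (acc.1, acc.2.1, acc.2.2 ++ [[("priority", "low"), ("type", "architecture"), ("description", PySem.Str.strip sec)]])
  else acc

def prioritize_optimizations_py_alt (response : String) : List (List (String × String)) :=
  let sections := (PySem.Str.split? response "\n\n").getD []  -- separator ≠ "", never none
  let buckets := sections.foldl pvStepB ([], [], [])
  buckets.1 ++ buckets.2.1 ++ buckets.2.2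

-- ===== PRECONDITION & SPEC =====
def Spec_prioritize_optimizations_py (response : String) (out : List (List (String × String))) : Prop := out = prioritize_optimizations_py_alt response
instance (response : String) (out : List (List (String × String))) : Decidable (Spec_prioritize_optimizations_py response out) := by unfold Spec_prioritize_optimizations_py; infer_instance

-- ===== CLAIM (what is proved, stated in full; the proofs are below) =====
def Claim_equal_prioritize_optimizations_py : Prop := ∀ (response : String), Dom_prioritize_optimizations_py response → Spec_prioritize_optimizations_py response (prioritize_optimizations_py response)

-- ===== LEMMAS AND PROOFS =====

-- the (0 or 1) items a single section contributes
def pvRoute (sec : String) : List (List (String × String)) :=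
  if PySem.Str.isIn "quick win" (PySem.Str.lower sec) then
    [[("priority", "immediate"), ("type", "quick_win"), ("description", PySem.Str.strip sec)]]
  else if PySem.Str.isIn "medium-term" (PySem.Str.lower sec) then
    [[("priority", "medium"), ("type", "refactoring"), ("description", PySem.Str.strip sec)]]
  else if PySem.Str.isIn "long-term" (PySem.Str.lower sec) then
    [[("priority", "low"), ("type", "architecture"), ("description", PySem.Str.strip sec)]]
  else []

def pvFiltK (j : Int) (xs : List (List (String × String))) : List (List (String × String)) :=
  xs.filter (fun x => pvPriorityKey x == j)

lemma pvStepA_eq (acc : List (List (String × String))) (sec : String) :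
    pvStepA acc sec = acc ++ pvRoute sec := by
  unfold pvStepA pvRoute; split_ifs <;> simp

lemma pvBuildA (ss : List String) (acc : List (List (String × String))) :
    ss.foldl pvStepA acc = acc ++ ss.flatMap pvRoute := by
  induction ss generalizing acc with
  | nil => simp
  | cons s ss ih => simp [List.foldl_cons, pvStepA_eq, ih]

lemma pvKey_imm (d : String) :
    pvPriorityKey [("priority", "immediate"), ("type", "quick_win"), ("description", d)] = 0 := rfl

lemma pvKey_med (d : String) :
    pvPriorityKey [("priority", "medium"), ("type", "refactoring"), ("description", d)] = 1 := rfl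

lemma pvKey_low (d : String) :
    pvPriorityKey [("priority", "low"), ("type", "architecture"), ("description", d)] = 2 := rfl

lemma pvKey_mem_route (x : List (String × String)) (sec : String) (hx : x ∈ pvRoute sec) :
    pvPriorityKey x = 0 ∨ pvPriorityKey x = 1 ∨ pvPriorityKey x = 2 := by
  unfold pvRoute at hx
  split_ifs at hx <;> simp at hx <;> subst hx <;>
    simp [pvKey_imm, pvKey_med, pvKey_low]

lemma pvInsertBy_mid {α : Type} (before : α → α → Bool) (x : α) (ls rs : List α)
    (h1 : ∀ y ∈ ls, before x y = false) (h2 : ∀ y ∈ rs, before x y = true) :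
    PySem.List.insertBy before x (ls ++ rs) = ls ++ x :: rs := by
  induction ls with
  | nil =>
    cases rs with
    | nil => simp [PySem.List.insertBy]
    | cons r rs => simp [PySem.List.insertBy, h2 r (by simp)]
  | cons l ls ih =>
    simp [PySem.List.insertBy, h1 l (by simp),
      ih (fun y hy => h1 y (List.mem_cons_of_mem _ hy))]

lemma pvMem_filtK {j : Int} {y : List (String × String)} {xs : List (List (String × String))}
    (hy : y ∈ pvFiltK j xs) : pvPriorityKey y = j := by
  unfold pvFiltK at hy
  simpa using (List.mem_filter.mp hy).2

lemma pvSortedBuckets (xs : List (List (String × String)))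
    (h : ∀ x ∈ xs, pvPriorityKey x = 0 ∨ pvPriorityKey x = 1 ∨ pvPriorityKey x = 2) :
    PySem.List.sorted xs pvPriorityKey = pvFiltK 0 xs ++ pvFiltK 1 xs ++ pvFiltK 2 xs := by
  rw [PySem.List.sorted_eq_foldl_insertBy]
  induction xs using List.reverseRecOn with
  | nil => simp [pvFiltK]
  | append_singleton ys x ih =>
    have hys : ∀ y ∈ ys, pvPriorityKey y = 0 ∨ pvPriorityKey y = 1 ∨ pvPriorityKey y = 2 :=
      fun y hy => h y (by simp [hy])
    have hfilt : ∀ j : Int, pvFiltK j (ys ++ [x]) =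
        pvFiltK j ys ++ if pvPriorityKey x == j then [x] else [] := by
      intro j; simp [pvFiltK, List.filter_append, List.filter_singleton]
    rw [List.foldl_append, List.foldl_cons, List.foldl_nil, ih hys]
    rcases h x (by simp) with hx | hx | hx
    · rw [List.append_assoc,
        pvInsertBy_mid _ x (pvFiltK 0 ys) (pvFiltK 1 ys ++ pvFiltK 2 ys)
        (fun y hy => by simp [hx, pvMem_filtK hy])
        (fun y hy => by
          rcases List.mem_append.mp hy with hy | hy <;> simp [hx, pvMem_filtK hy])]
      simp [hfilt, hx]
    · rw [pvInsertBy_mid _ x (pvFiltK 0 ys ++ pvFiltK 1 ys) (pvFiltK 2 ys)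
        (fun y hy => by
          rcases List.mem_append.mp hy with hy | hy <;> simp [hx, pvMem_filtK hy])
        (fun y hy => by simp [hx, pvMem_filtK hy])]
      simp [hfilt, hx]
    · rw [PySem.List.insertBy_of_forall_not_before _ x _
        (fun y hy => by
          rcases List.mem_append.mp hy with hy | hy
          · rcases List.mem_append.mp hy with hy | hy <;> simp [hx, pvMem_filtK hy]
          · simp [hx, pvMem_filtK hy])]
      simp [hfilt, hx]

lemma pvBuildB (ss : List String)
    (acc : List (List (String × String)) × List (List (String × String)) × List (List (String × String))) :
    ss.foldl pvStepB acc =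
      (acc.1 ++ pvFiltK 0 (ss.flatMap pvRoute),
       acc.2.1 ++ pvFiltK 1 (ss.flatMap pvRoute),
       acc.2.2 ++ pvFiltK 2 (ss.flatMap pvRoute)) := by
  induction ss generalizing acc with
  | nil => simp [pvFiltK]
  | cons s ss ih =>
    rw [List.foldl_cons, ih, List.flatMap_cons]
    unfold pvStepB pvRoute
    dsimp only
    split_ifs <;>
      simp [pvFiltK, pvKey_imm, pvKey_med, pvKey_low]

-- ===== VERDICT (by name: the statement is the Claim_ definition above) =====
theorem prioritize_optimizations_py_spec : Claim_equal_prioritize_optimizations_py := by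
  intro response _
  unfold Spec_prioritize_optimizations_py prioritize_optimizations_py prioritize_optimizations_py_alt
  dsimp only
  rw [pvBuildA, pvBuildB]
  simp only [List.nil_append]
  exact pvSortedBuckets _ (fun x hx => by
    rcases List.mem_flatMap.mp hx with ⟨s, _, hs⟩
    exact pvKey_mem_route x s hs)
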